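-- pv_equiv track=rewrite | github.com/mastersamasama/kiho | plugins/kiho/skills/_meta/skill-find/scripts/facet_walk.py | infer_capability
-- ===== SOURCE A (Python) =====
-- CAPABILITY_KEYWORDS: dict[str, list[str]] = {
--     "create":       ["create", "draft", "generate", "produce", "author", "write", "make", "build", "bootstrap", "recruit", "derive", "add"],
--     "read":         ["find", "search", "lookup", "query", "inspect", "view", "read", "show", "list", "discover", "retrieve"],
--     "update":       ["update", "improve", "fix", "patch", "mutate", "consolidate", "promote", "sync", "correct", "amend", "override", "apply"],
--     "delete":       ["delete", "deprecate", "retire", "remove", "archive"],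
--     "evaluate":     ["evaluate", "score", "lint", "validate", "audit", "check", "simulate", "verify", "review"],
--     "orchestrate":  ["orchestrate", "route", "delegate", "decompose", "plan", "coordinate", "dispatch"],
--     "communicate":  ["notify", "broadcast", "announce", "escalate", "send", "message"],
--     "decide":       ["decide", "vote", "adjudicate", "choose"],
-- }
--
-- def infer_capability(query_tokens: set[str], valid_verbs: set[str]) -> str | None:
--     """Map query tokens to a capability verb via CAPABILITY_KEYWORDS."""
--     for verb, keywords in CAPABILITY_KEYWORDS.items():
--         if verb not in valid_verbs:
--             continue
--         for kw in keywords: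
--             if kw in query_tokens:
--                 return verb
--     return None
-- ===== SOURCE B (Python) =====
-- CAPABILITY_KEYWORDS: dict[str, list[str]] = {
--     "create":       ["create", "draft", "generate", "produce", "author", "write", "make", "build", "bootstrap", "recruit", "derive", "add"],
--     "read":         ["find", "search", "lookup", "query", "inspect", "view", "read", "show", "list", "discover", "retrieve"],
--     "update":       ["update", "improve", "fix", "patch", "mutate", "consolidate", "promote", "sync", "correct", "amend", "override", "apply"],
--     "delete":       ["delete", "deprecate", "retire", "remove", "archive"],
--     "evaluate":     ["evaluate", "score", "lint", "validate", "audit", "check", "simulate", "verify", "review"],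
--     "orchestrate":  ["orchestrate", "route", "delegate", "decompose", "plan", "coordinate", "dispatch"],
--     "communicate":  ["notify", "broadcast", "announce", "escalate", "send", "message"],
--     "decide":       ["decide", "vote", "adjudicate", "choose"],
-- }
--
-- # Inverted index built once: keyword -> (priority of its verb in dict order, verb).
-- KEYWORD_TO_VERB: dict[str, tuple[int, str]] = {}
-- for _i, (_verb, _kws) in enumerate(CAPABILITY_KEYWORDS.items()):
--     for _kw in _kws:
--         KEYWORD_TO_VERB.setdefault(_kw, (_i, _verb))
--
--
-- def infer_capability(query_tokens: set[str], valid_verbs: set[str]) -> str | None: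
--     """Map query tokens to a capability verb via the inverted keyword index."""
--     best = None
--     for tok in query_tokens:
--         entry = KEYWORD_TO_VERB.get(tok)
--         if entry is not None and entry[1] in valid_verbs:
--             if best is None or entry[0] < best[0]:
--                 best = entry
--     return best[1] if best is not None else None
-- ===== Notes on version B (the rewrite author's own statement) =====
-- stated objective: alternative
-- what changed: Replaces the scan of the verb dictionary and its nested keyword lists with a precomputed inverted index keyword->(priority, verb); the function makes one pass over the query tokens, keeping the candidate of smallest verb priority.
import Mathlib
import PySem

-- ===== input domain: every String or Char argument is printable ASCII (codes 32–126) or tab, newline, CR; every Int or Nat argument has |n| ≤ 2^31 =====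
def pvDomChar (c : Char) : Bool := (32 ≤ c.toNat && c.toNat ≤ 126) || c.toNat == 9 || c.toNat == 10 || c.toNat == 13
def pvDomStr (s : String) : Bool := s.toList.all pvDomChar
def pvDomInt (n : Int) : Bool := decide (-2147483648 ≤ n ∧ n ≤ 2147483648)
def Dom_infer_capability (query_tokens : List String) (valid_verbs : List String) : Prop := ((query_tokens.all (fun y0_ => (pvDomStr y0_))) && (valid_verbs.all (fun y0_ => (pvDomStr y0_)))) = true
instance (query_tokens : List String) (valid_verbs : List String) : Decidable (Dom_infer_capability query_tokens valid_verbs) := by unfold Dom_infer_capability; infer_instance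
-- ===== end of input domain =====

-- B replaces A's scan of the verb table (and its nested keyword lists) by a single pass over the
-- query tokens against a precomputed inverted index keyword -> (priority, verb), keeping the
-- candidate of smallest verb priority; objective: alternative (different algorithm, similar cost).

-- ===== PORT A =====
def pvTable : List (String × List String) :=
  [ ("create",      ["create", "draft", "generate", "produce", "author", "write", "make", "build", "bootstrap", "recruit", "derive", "add"]),
    ("read",        ["find", "search", "lookup", "query", "inspect", "view", "read", "show", "list", "discover", "retrieve"]),
    ("update",      ["update", "improve", "fix", "patch", "mutate", "consolidate", "promote", "sync", "correct", "amend", "override", "apply"]),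
    ("delete",      ["delete", "deprecate", "retire", "remove", "archive"]),
    ("evaluate",    ["evaluate", "score", "lint", "validate", "audit", "check", "simulate", "verify", "review"]),
    ("orchestrate", ["orchestrate", "route", "delegate", "decompose", "plan", "coordinate", "dispatch"]),
    ("communicate", ["notify", "broadcast", "announce", "escalate", "send", "message"]),
    ("decide",      ["decide", "vote", "adjudicate", "choose"]) ]

-- inner loop: 'for kw in keywords: if kw in query_tokens: return verb'
def pvAnyIn (toks : List String) : List String → Bool
  | [] => false
  | kw :: rest => if toks.contains kw then true else pvAnyIn toks rest

-- outer loop over CAPABILITY_KEYWORDS.items()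
def pvInferGo (toks valid : List String) : List (String × List String) → Option String
  | [] => none
  | (verb, kws) :: rest =>
      if ¬ (valid.contains verb) then pvInferGo toks valid rest
      else if pvAnyIn toks kws then some verb
      else pvInferGo toks valid rest

def infer_capability (query_tokens : List String) (valid_verbs : List String) : Option String :=
  pvInferGo query_tokens valid_verbs pvTable

-- ===== PORT B =====
-- module-level loop of Source B: KEYWORD_TO_VERB built with setdefault over enumerate(items)
def pvKeywordToVerb : PySem.Dict String (Int × String) :=
  (PySem.List.enumerate pvTable).foldl
    (fun d p => p.2.2.foldl
      (fun d kw => if (d.get? kw).isSome then d else d.insert kw (p.1, p.2.1)) d)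
    PySem.Dict.empty

-- loop body of Source B's infer_capability
def pvStep (valid : List String) (b : Option (Int × String)) (tok : String) : Option (Int × String) :=
  match pvKeywordToVerb.get? tok with
  | none => b
  | some e =>
      if valid.contains e.2 then
        match b with
        | none => some e
        | some b' => if e.1 < b'.1 then some e else b
      else b

def infer_capability_alt (query_tokens : List String) (valid_verbs : List String) : Option String :=
  match query_tokens.foldl (pvStep valid_verbs) none with
  | some b => some b.2
  | none => none

-- ===== PRECONDITION & SPEC =====
def Spec_infer_capability (query_tokens : List String) (valid_verbs : List String) (out : Option String) : Prop := out = infer_capability_alt query_tokens valid_verbs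
instance (query_tokens : List String) (valid_verbs : List String) (out : Option String) : Decidable (Spec_infer_capability query_tokens valid_verbs out) := by unfold Spec_infer_capability; infer_instance

-- ===== CLAIM (what is proved, stated in full; the proofs are below) =====
def Claim_equal_infer_capability : Prop := ∀ (query_tokens : List String) (valid_verbs : List String), Dom_infer_capability query_tokens valid_verbs → Spec_infer_capability query_tokens valid_verbs (infer_capability query_tokens valid_verbs)

-- ===== LEMMAS AND PROOFS =====

-- the verb and keyword list at priority j (proof-layer helpers)
def pvVerb : Nat → String
  | 0 => "create" | 1 => "read" | 2 => "update" | 3 => "delete"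
  | 4 => "evaluate" | 5 => "orchestrate" | 6 => "communicate" | _ => "decide"

def pvKws : Nat → List String
  | 0 => ["create", "draft", "generate", "produce", "author", "write", "make", "build", "bootstrap", "recruit", "derive", "add"]
  | 1 => ["find", "search", "lookup", "query", "inspect", "view", "read", "show", "list", "discover", "retrieve"]
  | 2 => ["update", "improve", "fix", "patch", "mutate", "consolidate", "promote", "sync", "correct", "amend", "override", "apply"]
  | 3 => ["delete", "deprecate", "retire", "remove", "archive"]
  | 4 => ["evaluate", "score", "lint", "validate", "audit", "check", "simulate", "verify", "review"]
  | 5 => ["orchestrate", "route", "delegate", "decompose", "plan", "coordinate", "dispatch"]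
  | 6 => ["notify", "broadcast", "announce", "escalate", "send", "message"]
  | _ => ["decide", "vote", "adjudicate", "choose"]

def pvCond (toks valid : List String) (j : Nat) : Bool :=
  valid.contains (pvVerb j) && (pvKws j).any (fun kw => toks.contains kw)

-- first index in l whose condition holds
def pvHitL (p : Nat → Bool) : List Nat → Option Nat
  | [] => none
  | j :: rest => if p j then some j else pvHitL p rest

def pvIdx : List Nat := [0, 1, 2, 3, 4, 5, 6, 7]

def pvG (j : Nat) : Int × String := ((j : Int), pvVerb j)

def pvMerge : Option (Int × String) → Option (Int × String) → Option (Int × String)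
  | b, none => b
  | none, some c => some c
  | some b', some c' => if c'.1 < b'.1 then some c' else some b'

-- the filtered lookup for one token
def pvCand (valid : List String) (tok : String) : Option (Int × String) :=
  pvStep valid none tok

-- the computed inverted index, as a literal
set_option maxRecDepth 4000 in
lemma pvKm_eq : pvKeywordToVerb = PySem.Dict.mk [("create", ((0 : Int), "create")), ("draft", ((0 : Int), "create")), ("generate", ((0 : Int), "create")), ("produce", ((0 : Int), "create")), ("author", ((0 : Int), "create")), ("write", ((0 : Int), "create")), ("make", ((0 : Int), "create")), ("build", ((0 : Int), "create")), ("bootstrap", ((0 : Int), "create")), ("recruit", ((0 : Int), "create")), ("derive", ((0 : Int), "create")), ("add", ((0 : Int), "create")), ("find", ((1 : Int), "read")), ("search", ((1 : Int), "read")), ("lookup", ((1 : Int), "read")), ("query", ((1 : Int), "read")), ("inspect", ((1 : Int), "read")), ("view", ((1 : Int), "read")), ("read", ((1 : Int), "read")), ("show", ((1 : Int), "read")), ("list", ((1 : Int), "read")), ("discover", ((1 : Int), "read")), ("retrieve", ((1 : Int), "read")), ("update", ((2 : Int), "update")), ("improve", ((2 : Int), "update")), ("fix", ((2 : Int), "update")),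 ("patch", ((2 : Int), "update")), ("mutate", ((2 : Int), "update")), ("consolidate", ((2 : Int), "update")), ("promote", ((2 : Int), "update")), ("sync", ((2 : Int), "update")), ("correct", ((2 : Int), "update")), ("amend", ((2 : Int), "update")), ("override", ((2 : Int), "update")), ("apply", ((2 : Int), "update")), ("delete", ((3 : Int), "delete")), ("deprecate", ((3 : Int), "delete")), ("retire", ((3 : Int), "delete")), ("remove", ((3 : Int), "delete")), ("archive", ((3 : Int), "delete")), ("evaluate", ((4 : Int), "evaluate")), ("score", ((4 : Int), "evaluate")), ("lint", ((4 : Int), "evaluate")), ("validate", ((4 : Int), "evaluate")), ("audit", ((4 : Int), "evaluate")), ("check", ((4 : Int), "evaluate")), ("simulate", ((4 : Int), "evaluate")), ("verify", ((4 : Int), "evaluate")), ("review", ((4 : Int), "evaluate")), ("orchestrate", ((5 : Int), "orchestrate")), ("route", ((5 : Int), "orchestrate")), ("delegate", ((5 : Int), "orchestrate")), ("decompose", ((5 : Int), "orchestrate")), ("plan", ((5 : Int), "orchestrate")), ("coordinate", ((5 : Int), "orchestrate")), ("dispatch", ((5 : Int), "orchestrate")), ("notify", ((6 : Int), "communicate")),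 ("broadcast", ((6 : Int), "communicate")), ("announce", ((6 : Int), "communicate")), ("escalate", ((6 : Int), "communicate")), ("send", ((6 : Int), "communicate")), ("message", ((6 : Int), "communicate")), ("decide", ((7 : Int), "decide")), ("vote", ((7 : Int), "decide")), ("adjudicate", ((7 : Int), "decide")), ("choose", ((7 : Int), "decide"))] := by rfl

def pvAllK : List String := ["create", "draft", "generate", "produce", "author", "write", "make", "build", "bootstrap", "recruit", "derive", "add", "find", "search", "lookup", "query", "inspect", "view", "read", "show", "list", "discover", "retrieve", "update", "improve", "fix", "patch", "mutate", "consolidate", "promote", "sync", "correct", "amend", "override", "apply", "delete", "deprecate", "retire", "remove", "archive", "evaluate", "score", "lint", "validate", "audit", "check", "simulate", "verify", "review", "orchestrate", "route", "delegate", "decompose", "plan", "coordinate", "dispatch", "notify", "broadcast", "announce", "escalate", "send", "message", "decide", "vote", "adjudicate", "choose"]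

lemma pvKm_none (t : String) (h : pvKeywordToVerb.get? t = none) :
    ∀ i, i < 8 → (pvKws i).contains t = false := by
  have hm : t ∉ pvAllK := by
    rw [pvKm_eq, PySem.Dict.get?_eq_none_iff_not_mem_keys] at h
    simpa [pvAllK] using h
  simp only [pvAllK, List.mem_cons, not_or] at hm
  intro i hi
  interval_cases i <;> simp_all [pvKws]

set_option maxRecDepth 10000 in
lemma pvKm_some (t : String) :
    ∀ e ∈ pvKeywordToVerb.get? t, e = pvG e.1.toNat ∧ e.1.toNat < 8 ∧
      ∀ i, i < 8 → ((pvKws i).contains t = (i == e.1.toNat)) := by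
  by_cases hm : t ∈ pvAllK
  · fin_cases hm <;> (rw [pvKm_eq]; decide)
  · have hg : pvKeywordToVerb.get? t = none := by
      rw [pvKm_eq, PySem.Dict.get?_eq_none_iff_not_mem_keys]
      simpa [pvAllK] using hm
    simp [hg]

lemma pvAnyIn_eq (toks kws : List String) :
    pvAnyIn toks kws = kws.any (fun kw => toks.contains kw) := by
  induction kws with
  | nil => rfl
  | cons k r ih => by_cases h : toks.contains k = true <;> simp [pvAnyIn, h, ih]

lemma pvAnyOr (l : List String) (p q : String → Bool) :
    (l.any fun x => p x || q x) = (l.any p || l.any q) := by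
  induction l with
  | nil => rfl
  | cons a r ih => simp [ih]; cases p a <;> cases q a <;> simp [Bool.or_left_comm]

lemma pvAnyBeq (l : List String) (t : String) : (l.any fun x => x == t) = l.contains t := by
  induction l with
  | nil => rfl
  | cons a r ih =>
    by_cases h : a = t
    · subst h; simp
    · simp [h, Ne.symm h, ih]

lemma pvAny_cons (kws ts : List String) (t : String) :
    kws.any (fun kw => (t :: ts).contains kw)
      = (kws.contains t || kws.any (fun kw => ts.contains kw)) := by
  have : ∀ kw : String, (t :: ts).contains kw = ((kw == t) || ts.contains kw) := by
    intro kw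
    by_cases h : kw = t
    · subst h; simp
    · simp [h, Ne.symm h]
  simp only [this, pvAnyOr, pvAnyBeq]

lemma pvInferGo_cons (toks valid : List String) (vb : String) (kws : List String)
    (rest : List (String × List String)) :
    pvInferGo toks valid ((vb, kws) :: rest)
      = if (valid.contains vb && pvAnyIn toks kws) then some vb
        else pvInferGo toks valid rest := by
  by_cases hv : valid.contains vb = true <;> by_cases hk : pvAnyIn toks kws = true <;>
    simp [pvInferGo, hv, hk]

lemma pvGo_hit (toks valid : List String) (idxs : List Nat) :
    pvInferGo toks valid (idxs.map (fun j => (pvVerb j, pvKws j)))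
      = (pvHitL (pvCond toks valid) idxs).map pvVerb := by
  induction idxs with
  | nil => rfl
  | cons a r ih =>
    rw [List.map_cons, pvInferGo_cons, pvAnyIn_eq, ih]
    have hrw : pvHitL (pvCond toks valid) (a :: r)
        = if pvCond toks valid a = true then some a else pvHitL (pvCond toks valid) r := rfl
    show (if pvCond toks valid a = true then some (pvVerb a)
        else Option.map pvVerb (pvHitL (pvCond toks valid) r)) = _
    rw [hrw]
    by_cases h : pvCond toks valid a = true
    · rw [if_pos h, if_pos h]; rfl
    · rw [if_neg h, if_neg h]

lemma pvA_eq (toks valid : List String) :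
    infer_capability toks valid = (pvHitL (pvCond toks valid) pvIdx).map pvVerb := by
  show pvInferGo toks valid pvTable = _
  rw [show pvTable = pvIdx.map (fun j => (pvVerb j, pvKws j)) from rfl]
  exact pvGo_hit toks valid pvIdx

lemma pvMerge_none_left (c : Option (Int × String)) : pvMerge none c = c := by
  cases c <;> rfl
lemma pvMerge_none_right (b : Option (Int × String)) : pvMerge b none = b := by
  cases b <;> rfl
lemma pvMerge_assoc (a b c : Option (Int × String)) :
    pvMerge (pvMerge a b) c = pvMerge a (pvMerge b c) := by
  cases a with
  | none => simp [pvMerge_none_left]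
  | some a' =>
    cases b with
    | none => simp [pvMerge_none_right, pvMerge_none_left]
    | some b' =>
      cases c with
      | none => simp [pvMerge_none_right]
      | some c' =>
        by_cases h1 : b'.1 < a'.1 <;> by_cases h2 : c'.1 < b'.1 <;>
          by_cases h3 : c'.1 < a'.1 <;> simp [pvMerge, h1, h2, h3] <;> omega

lemma pvStep_eq_merge (valid : List String) (b : Option (Int × String)) (t : String) :
    pvStep valid b t = pvMerge b (pvCand valid t) := by
  unfold pvCand pvStep
  cases h : pvKeywordToVerb.get? t with
  | none => simp [h, pvMerge_none_right]
  | some e =>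
    by_cases hv : e.2 ∈ valid
    · cases b <;> simp [h, hv, pvMerge]
    · cases b <;> simp [h, hv, pvMerge]

lemma pvFold_eq (valid : List String) (toks : List String) (b : Option (Int × String)) :
    toks.foldl (pvStep valid) b = pvMerge b (toks.foldl (pvStep valid) none) := by
  induction toks generalizing b with
  | nil => simp [pvMerge_none_right]
  | cons t ts ih =>
    simp only [List.foldl_cons]
    rw [ih (pvStep valid b t), ih (pvStep valid none t),
        pvStep_eq_merge valid b t, pvStep_eq_merge valid none t,
        pvMerge_none_left, pvMerge_assoc]

lemma pvHitL_mem (p : Nat → Bool) (l : List Nat) (b : Nat) (h : pvHitL p l = some b) :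
    b ∈ l ∧ p b = true := by
  induction l with
  | nil => simp [pvHitL] at h
  | cons a r ih =>
    by_cases ha : p a = true
    · simp [pvHitL, ha] at h; subst h; exact ⟨List.mem_cons_self, ha⟩
    · simp [pvHitL, ha] at h
      rcases ih h with ⟨h1, h2⟩
      exact ⟨List.mem_cons_of_mem _ h1, h2⟩

lemma pvHitL_congr (p q : Nat → Bool) (l : List Nat) (h : ∀ j ∈ l, p j = q j) :
    pvHitL p l = pvHitL q l := by
  induction l with
  | nil => rfl
  | cons a r ih =>
    have ha := h a List.mem_cons_self
    simp only [pvHitL, ha]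
    by_cases hq : q a = true
    · simp [hq]
    · simp [hq]; exact ih (fun j hj => h j (List.mem_cons_of_mem _ hj))

lemma pvMerge_hit (l : List Nat) (hs : l.Pairwise (· < ·)) (p : Nat → Bool) (j : Nat)
    (hj : j ∈ l) :
    pvMerge (some (pvG j)) ((pvHitL p l).map pvG)
      = (pvHitL (fun i => p i || (i == j)) l).map pvG := by
  induction l with
  | nil => cases hj
  | cons a r ih =>
    rcases List.pairwise_cons.mp hs with ⟨ha, hr⟩
    rcases List.mem_cons.mp hj with rfl | hjr
    · by_cases hp : p j = true
      · simp [pvHitL, hp, pvMerge]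
      · simp only [pvHitL, hp, Bool.false_or, beq_self_eq_true, if_true, if_false,
          Bool.false_eq_true]
        cases hrec : pvHitL p r with
        | none => simp [pvMerge]
        | some b =>
          have hb := pvHitL_mem p r b hrec
          have hjb : j < b := ha b hb.1
          simp only [Option.map_some, pvMerge, pvG]
          have hnb : ¬ ((b : Int) < (j : Int)) := by omega
          simp [hnb]
    · have hja : a < j := ha j hjr
      by_cases hp : p a = true
      · have hab : ((a : Int) < (j : Int)) := by omega
        simp [pvHitL, hp, pvMerge, pvG, hab]
      · have haj : (a == j) = false := by simp; omega
        simp only [pvHitL, hp, haj, Bool.or_false, if_false, Bool.false_eq_true]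
        exact ih hr hjr

lemma pvBest_eq (valid toks : List String) :
    toks.foldl (pvStep valid) none = (pvHitL (pvCond toks valid) pvIdx).map pvG := by
  induction toks with
  | nil =>
    have hc : ∀ j ∈ pvIdx, pvCond [] valid j = (fun _ => false) j := by
      intro j _; simp [pvCond]
    rw [List.foldl_nil, pvHitL_congr _ _ _ hc]
    simp [pvIdx, pvHitL]
  | cons t ts ih =>
    have hmem : ∀ j, j ∈ pvIdx ↔ j < 8 := by intro j; simp [pvIdx]; omega
    have hcons : ∀ j, pvCond (t :: ts) valid j
        = (valid.contains (pvVerb j) && ((pvKws j).contains t || (pvKws j).any (fun kw => ts.contains kw))) := by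
      intro j; rw [pvCond, pvAny_cons]
    rw [List.foldl_cons, pvFold_eq, ih]
    have hstep : pvStep valid none t = pvCand valid t := rfl
    rw [hstep]
    cases hk : pvKeywordToVerb.get? t with
    | none =>
      have hnone : pvCand valid t = none := by unfold pvCand pvStep; rw [hk]
      have hno := pvKm_none t hk
      rw [hnone, pvMerge_none_left]
      refine congrArg (Option.map pvG) (pvHitL_congr _ _ _ ?_)
      intro j hj
      rw [hcons j, hno j ((hmem j).mp hj), pvCond]
      simp
    | some e =>
      obtain ⟨he, hj8, hmem8⟩ := pvKm_some t e (by simp [hk])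
      set j := e.1.toNat with hjdef
      by_cases hv : valid.contains (pvVerb j) = true
      · have hcand : pvCand valid t = some (pvG j) := by
          unfold pvCand pvStep; rw [hk]
          rw [he]
          simp only [pvG]
          rw [if_pos (by simpa [pvG] using hv)]
        rw [hcand, pvMerge_hit pvIdx (by decide) _ j ((hmem j).mpr hj8)]
        refine congrArg (Option.map pvG) (pvHitL_congr _ _ _ ?_)
        intro i hi
        rw [hcons i]
        by_cases hij : i = j
        · rw [hij, hmem8 j hj8]
          simp [show pvVerb j ∈ valid from by simpa using hv]
        · have h1 : (i == j) = false := by simp [hij]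
          rw [hmem8 i ((hmem i).mp hi), h1, pvCond]
          simp
      · have hcand : pvCand valid t = none := by
          unfold pvCand pvStep; rw [hk, he]
          simp only [pvG]
          rw [if_neg (by simpa [pvG] using hv)]
        rw [hcand, pvMerge_none_left]
        refine congrArg (Option.map pvG) (pvHitL_congr _ _ _ ?_)
        intro i hi
        rw [hcons i]
        by_cases hij : i = j
        · have hvf : valid.contains (pvVerb j) = false := by simpa using hv
          rw [hij, hmem8 j hj8, hvf, pvCond, hvf]
          simp
        · have h1 : (i == j) = false := by simp [hij]
          rw [hmem8 i ((hmem i).mp hi), h1, pvCond]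
          simp

-- ===== VERDICT (by name: the statement is the Claim_ definition above) =====
theorem infer_capability_spec : Claim_equal_infer_capability := by
  intro toks valid _
  unfold Spec_infer_capability
  rw [pvA_eq]
  unfold infer_capability_alt
  rw [pvBest_eq]
  cases pvHitL (pvCond toks valid) pvIdx <;> rfl
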